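-- pv_equiv track=rewrite | github.com/satchwaldman/spotFinder | deprecated/src/spot_check.py | find_min_rgb
-- ===== SOURCE A (Python) =====
-- def find_min_rgb(img, dot_x, dot_y, dot_size):
--     min_rgbs = [255, 255, 255]
--     for y_pixel in range(dot_y, dot_y + dot_size):
--         for x_pixel in range(dot_x, dot_x + dot_size):
--             for color in range(3):
--                 curr_pixel = img[y_pixel][x_pixel][color]
--                 if curr_pixel < min_rgbs[color]:
--                     min_rgbs[color] = curr_pixel
--     return min_rgbs
-- ===== SOURCE B (Python) =====
-- def find_min_rgb(img, dot_x, dot_y, dot_size):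
--     def merge(p, q):
--         return [p[c] if p[c] < q[c] else q[c] for c in range(3)]
--
--     def row_min(row, x0, x1):
--         if x1 - x0 <= 0:
--             return [255, 255, 255]
--         if x1 - x0 == 1:
--             return merge(row[x0], [255, 255, 255])
--         m = (x0 + x1) // 2
--         return merge(row_min(row, x0, m), row_min(row, m, x1))
--
--     def rows_min(y0, y1):
--         if y1 - y0 <= 0:
--             return [255, 255, 255]
--         if y1 - y0 == 1:
--             return row_min(img[y0], dot_x, dot_x + dot_size)
--         m = (y0 + y1) // 2
--         return merge(rows_min(y0, m), rows_min(m, y1))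
--
--     return rows_min(dot_y, dot_y + dot_size)
-- ===== Notes on version B (the rewrite author's own statement) =====
-- stated objective: alternative
-- what changed: Replaces A's fused linear scan with a mutable 3-element running-minimum accumulator by a divide-and-conquer tournament reduction: the row interval and the column interval are recursively halved and the two halves' per-channel minima are combined with an elementwise-min merge, single pixels being merged against the [255,255,255] seed.
import Mathlib
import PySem

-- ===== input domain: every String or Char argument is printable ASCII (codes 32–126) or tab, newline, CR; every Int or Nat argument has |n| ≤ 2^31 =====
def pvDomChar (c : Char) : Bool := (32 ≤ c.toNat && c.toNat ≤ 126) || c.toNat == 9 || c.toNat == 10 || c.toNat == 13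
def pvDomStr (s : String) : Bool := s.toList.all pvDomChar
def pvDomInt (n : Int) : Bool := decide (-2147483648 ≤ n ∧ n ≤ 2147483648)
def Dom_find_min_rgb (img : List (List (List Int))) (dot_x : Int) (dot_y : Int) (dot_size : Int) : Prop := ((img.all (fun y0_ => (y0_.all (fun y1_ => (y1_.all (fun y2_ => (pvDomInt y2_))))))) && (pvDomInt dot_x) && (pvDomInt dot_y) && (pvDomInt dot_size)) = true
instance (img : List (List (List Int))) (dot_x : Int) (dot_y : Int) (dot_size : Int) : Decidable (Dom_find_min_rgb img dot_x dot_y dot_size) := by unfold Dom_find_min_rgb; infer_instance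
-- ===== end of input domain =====

-- B replaces A's fused linear scan with a running 3-element accumulator by a
-- divide-and-conquer tournament reduction (halve the interval, merge the two halves'
-- per-channel minima elementwise); alternative decomposition, same asymptotic cost.

-- ===== PORT A =====
def find_min_rgb (img : List (List (List Int))) (dot_x : Int) (dot_y : Int) (dot_size : Int) : List Int :=
  (PySem.List.pyRange dot_y (dot_y + dot_size) 1).foldl (fun acc y =>
    (PySem.List.pyRange dot_x (dot_x + dot_size) 1).foldl (fun acc x =>
      (PySem.List.pyRange 0 3 1).foldl (fun acc c =>
        let curr := PySem.List.pyGetD (PySem.List.pyGetD (PySem.List.pyGetD img y []) x []) c 0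
        if curr < PySem.List.pyGetD acc c 0 then PySem.List.pySetD acc c curr else acc) acc) acc)
    [255, 255, 255]

-- ===== PORT B =====
-- merge(p, q) = [p[c] if p[c] < q[c] else q[c] for c in range(3)]
def pvMerge (p q : List Int) : List Int :=
  (PySem.List.pyRange 0 3 1).map (fun c =>
    if PySem.List.pyGetD p c 0 < PySem.List.pyGetD q c 0
    then PySem.List.pyGetD p c 0 else PySem.List.pyGetD q c 0)

-- row_min / rows_min: divide-and-conquer over an interval; the Nat fuel only makes
-- the halving recursion structural (it is always sufficient: fuel = interval length).
def pvRowMinGo (row : List (List Int)) (x0 x1 : Int) : Nat → List Int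
  | 0 => [255, 255, 255]
  | fuel + 1 =>
    if x1 - x0 ≤ 0 then [255, 255, 255]
    else if x1 - x0 = 1 then pvMerge (PySem.List.pyGetD row x0 []) [255, 255, 255]
    else
      pvMerge (pvRowMinGo row x0 (PySem.Int.floordiv (x0 + x1) 2) fuel)
              (pvRowMinGo row (PySem.Int.floordiv (x0 + x1) 2) x1 fuel)

def pvRowMin (row : List (List Int)) (x0 x1 : Int) : List Int :=
  pvRowMinGo row x0 x1 (x1 - x0).toNat

def pvRowsMinGo (img : List (List (List Int))) (dot_x dot_size : Int) (y0 y1 : Int) : Nat → List Int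
  | 0 => [255, 255, 255]
  | fuel + 1 =>
    if y1 - y0 ≤ 0 then [255, 255, 255]
    else if y1 - y0 = 1 then pvRowMin (PySem.List.pyGetD img y0 []) dot_x (dot_x + dot_size)
    else
      pvMerge (pvRowsMinGo img dot_x dot_size y0 (PySem.Int.floordiv (y0 + y1) 2) fuel)
              (pvRowsMinGo img dot_x dot_size (PySem.Int.floordiv (y0 + y1) 2) y1 fuel)

def pvRowsMin (img : List (List (List Int))) (dot_x dot_size : Int) (y0 y1 : Int) : List Int :=
  pvRowsMinGo img dot_x dot_size y0 y1 (y1 - y0).toNat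

def find_min_rgb_alt (img : List (List (List Int))) (dot_x : Int) (dot_y : Int) (dot_size : Int) : List Int :=
  pvRowsMin img dot_x dot_size dot_y (dot_y + dot_size)

-- ===== PRECONDITION & SPEC =====
-- Pre_: exactly the inputs on which Python A returns normally — every addressed row,
-- pixel and the three colour channels are in range (negative indices wrap as in Python);
-- stated with interval bounds first so it is checked without enumerating a huge range.
def pvRowOk (row : List (List Int)) (dot_x : Int) (dot_size : Int) : Bool :=
  decide (PySem.Raise.InRange row.length dot_x) &&
  decide (dot_x + dot_size ≤ (row.length : Int)) &&
  (PySem.List.pyRange dot_x (dot_x + dot_size) 1).all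
    (fun x => decide (3 ≤ (PySem.List.pyGetD row x []).length))

def pvPreB (img : List (List (List Int))) (dot_x : Int) (dot_y : Int) (dot_size : Int) : Bool :=
  if dot_size ≤ 0 then true
  else if PySem.Raise.InRange img.length dot_y ∧ dot_y + dot_size ≤ (img.length : Int) then
    (PySem.List.pyRange dot_y (dot_y + dot_size) 1).all
      (fun y => pvRowOk (PySem.List.pyGetD img y []) dot_x dot_size)
  else false

def Pre_find_min_rgb (img : List (List (List Int))) (dot_x : Int) (dot_y : Int) (dot_size : Int) : Prop :=
  pvPreB img dot_x dot_y dot_size = true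
instance (img : List (List (List Int))) (dot_x : Int) (dot_y : Int) (dot_size : Int) : Decidable (Pre_find_min_rgb img dot_x dot_y dot_size) := by unfold Pre_find_min_rgb; infer_instance

def pvWitness_find_min_rgb : List (List (List Int)) × Int × Int × Int :=
  ([[[10, 20, 30], [5, 6, 7]], [[1, 2, 3], [200, 100, 0]]], 0, 0, 2)

def Spec_find_min_rgb (img : List (List (List Int))) (dot_x : Int) (dot_y : Int) (dot_size : Int) (out : List Int) : Prop := out = find_min_rgb_alt img dot_x dot_y dot_size
instance (img : List (List (List Int))) (dot_x : Int) (dot_y : Int) (dot_size : Int) (out : List Int) : Decidable (Spec_find_min_rgb img dot_x dot_y dot_size out) := by unfold Spec_find_min_rgb; infer_instance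

-- ===== CLAIM (what is proved, stated in full; the proofs are below) =====
def Claim_equal_find_min_rgb : Prop := ∀ (img : List (List (List Int))) (dot_x : Int) (dot_y : Int) (dot_size : Int), Dom_find_min_rgb img dot_x dot_y dot_size → Pre_find_min_rgb img dot_x dot_y dot_size → Spec_find_min_rgb img dot_x dot_y dot_size (find_min_rgb img dot_x dot_y dot_size)

-- ===== LEMMAS AND PROOFS =====

-- The per-channel minima of a pixel list, seeded with 255 (the common value both
-- algorithms compute).
def pvMins (ps : List (List Int)) : List Int :=
  [(ps.map (fun p => PySem.List.pyGetD p 0 0)).foldl min 255,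
   (ps.map (fun p => PySem.List.pyGetD p 1 0)).foldl min 255,
   (ps.map (fun p => PySem.List.pyGetD p 2 0)).foldl min 255]

lemma pvFoldl_min_le (s : Int) (l : List Int) : l.foldl min s ≤ s := by
  induction l generalizing s with
  | nil => simp
  | cons a l ih => exact le_trans (ih _) (min_le_left _ _)

lemma pvFoldl_min_min (s t : Int) (l : List Int) :
    l.foldl min (min s t) = min s (l.foldl min t) := by
  induction l generalizing t with
  | nil => rfl
  | cons a l ih => simpa [min_assoc] using ih (min t a)

lemma pvFoldl_min_append (s : Int) (a b : List Int) :
    (a ++ b).foldl min s = min (a.foldl min s) (b.foldl min s) := by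
  have h : a.foldl min s = min (a.foldl min s) s :=
    (min_eq_left (pvFoldl_min_le s a)).symm
  rw [List.foldl_append]
  conv_lhs => rw [h]
  rw [pvFoldl_min_min]

lemma pvMerge_mins (a b : List (List Int)) :
    pvMerge (pvMins a) (pvMins b) = pvMins (a ++ b) := by
  have h3 : PySem.List.pyRange 0 3 1 = [0, 1, 2] := by decide
  simp only [pvMerge, pvMins, h3, List.map, List.map_append, pvFoldl_min_append]
  simp [PySem.List.pyGetD_ofNat', min_def]
  constructor
  · split_ifs <;> omega
  constructor
  · split_ifs <;> omega
  · split_ifs <;> omega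

lemma pvMerge_single (p : List Int) :
    pvMerge p [255, 255, 255] = pvMins [p] := by
  have h3 : PySem.List.pyRange 0 3 1 = [0, 1, 2] := by decide
  simp only [pvMerge, pvMins, h3, List.map, List.foldl]
  simp [PySem.List.pyGetD_ofNat', min_def]
  constructor
  · split_ifs <;> omega
  constructor
  · split_ifs <;> omega
  · split_ifs <;> omega

-- pvRowMinGo computes the per-channel minima of the addressed pixels of one row
-- whenever the fuel covers the interval length.
lemma pvRowMinGo_eq (row : List (List Int)) (fuel : Nat) (x0 x1 : Int)
    (hf : (x1 - x0).toNat ≤ fuel) :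
    pvRowMinGo row x0 x1 fuel =
      pvMins ((PySem.List.pyRange x0 x1 1).map (fun x => PySem.List.pyGetD row x [])) := by
  induction fuel generalizing x0 x1 with
  | zero =>
    rw [pvRowMinGo, show PySem.List.pyRange x0 x1 1 = [] from
      PySem.List.pyRange_one_eq_nil (by omega)]
    rfl
  | succ fuel ih =>
    rw [pvRowMinGo]
    by_cases h0 : x1 - x0 ≤ 0
    · rw [if_pos h0, show PySem.List.pyRange x0 x1 1 = [] from
        PySem.List.pyRange_one_eq_nil (by omega)]
      rfl
    · rw [if_neg h0]
      by_cases h1 : x1 - x0 = 1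
      · rw [if_pos h1]
        have : x1 = x0 + 1 := by omega
        subst this
        rw [PySem.List.pyRange_one_singleton]
        simpa using pvMerge_single (PySem.List.pyGetD row x0 [])
      · rw [if_neg h1]
        have h2 : x0 + 2 ≤ x1 := by omega
        have hlo : x0 + 1 ≤ PySem.Int.floordiv (x0 + x1) 2 :=
          (PySem.Int.le_floordiv_iff_mul_le (by omega)).mpr (by omega)
        have hhi : PySem.Int.floordiv (x0 + x1) 2 < x1 :=
          (PySem.Int.floordiv_lt_iff_lt_mul (by omega)).mpr (by omega)
        rw [ih x0 _ (by omega), ih _ x1 (by omega), pvMerge_mins,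
          ← List.map_append, ← PySem.List.pyRange_one_append x0 _ x1 (by omega) (by omega)]

-- pvRowsMinGo computes the per-channel minima of all addressed pixels.
lemma pvRowsMinGo_eq (img : List (List (List Int))) (dot_x dot_size : Int) (fuel : Nat)
    (y0 y1 : Int) (hf : (y1 - y0).toNat ≤ fuel) :
    pvRowsMinGo img dot_x dot_size y0 y1 fuel =
      pvMins ((PySem.List.pyRange y0 y1 1).flatMap (fun y =>
        (PySem.List.pyRange dot_x (dot_x + dot_size) 1).map (fun x =>
          PySem.List.pyGetD (PySem.List.pyGetD img y []) x []))) := by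
  induction fuel generalizing y0 y1 with
  | zero =>
    rw [pvRowsMinGo, show PySem.List.pyRange y0 y1 1 = [] from
      PySem.List.pyRange_one_eq_nil (by omega)]
    rfl
  | succ fuel ih =>
    rw [pvRowsMinGo]
    by_cases h0 : y1 - y0 ≤ 0
    · rw [if_pos h0, show PySem.List.pyRange y0 y1 1 = [] from
        PySem.List.pyRange_one_eq_nil (by omega)]
      rfl
    · rw [if_neg h0]
      by_cases h1 : y1 - y0 = 1
      · rw [if_pos h1]
        have : y1 = y0 + 1 := by omega
        subst this
        rw [PySem.List.pyRange_one_singleton, pvRowMin,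
          pvRowMinGo_eq _ _ _ _ (le_refl _)]
        simp
      · rw [if_neg h1]
        have h2 : y0 + 2 ≤ y1 := by omega
        have hlo : y0 + 1 ≤ PySem.Int.floordiv (y0 + y1) 2 :=
          (PySem.Int.le_floordiv_iff_mul_le (by omega)).mpr (by omega)
        have hhi : PySem.Int.floordiv (y0 + y1) 2 < y1 :=
          (PySem.Int.floordiv_lt_iff_lt_mul (by omega)).mpr (by omega)
        rw [ih y0 _ (by omega), ih _ y1 (by omega), pvMerge_mins,
          ← List.flatMap_append,
          ← PySem.List.pyRange_one_append y0 _ y1 (by omega) (by omega)]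

-- A's step on one pixel (the inner colour loop), abbreviated for the proofs below.
def pvStepA (acc p : List Int) : List Int :=
  (PySem.List.pyRange 0 3 1).foldl (fun acc c =>
    let curr := PySem.List.pyGetD p c 0
    if curr < PySem.List.pyGetD acc c 0 then PySem.List.pySetD acc c curr else acc) acc

lemma pvStepA_triple (a b c : Int) (p : List Int) :
    pvStepA [a, b, c] p =
      [min a (PySem.List.pyGetD p 0 0), min b (PySem.List.pyGetD p 1 0),
       min c (PySem.List.pyGetD p 2 0)] := by
  have h3 : PySem.List.pyRange 0 3 1 = [0, 1, 2] := by decide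
  simp only [pvStepA, h3, List.foldl]
  split_ifs <;>
    simp_all [PySem.List.pyGetD_ofNat', PySem.List.pySetD_of_nonneg, min_def]

-- Folding over a flatMap is the nested fold.
lemma pvFoldl_flatMap {α β γ : Type} (f : β → α → β) (g : γ → List α) (l : List γ)
    (init : β) : (l.flatMap g).foldl f init =
      l.foldl (fun acc y => (g y).foldl f acc) init := by
  induction l generalizing init with
  | nil => simp
  | cons y l ih => simp [List.foldl_append, ih]

-- A's whole fold, componentwise: folding pvStepA over any pixel list is pvMins.
lemma pvFoldA (ps : List (List Int)) :
    ps.foldl pvStepA [255, 255, 255] = pvMins ps := by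
  suffices h : ∀ a b c, ps.foldl pvStepA [a, b, c] =
      [(ps.map (fun p => PySem.List.pyGetD p 0 0)).foldl min a,
       (ps.map (fun p => PySem.List.pyGetD p 1 0)).foldl min b,
       (ps.map (fun p => PySem.List.pyGetD p 2 0)).foldl min c] by
    exact h 255 255 255
  induction ps with
  | nil => intro a b c; simp
  | cons p ps ih => intro a b c; simp [List.foldl_cons, pvStepA_triple, ih]

-- ===== VERDICT (by name: the statement is the Claim_ definition above) =====
theorem find_min_rgb_spec : Claim_equal_find_min_rgb := by
  intro img dot_x dot_y dot_size _ _
  unfold Spec_find_min_rgb find_min_rgb find_min_rgb_alt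
  rw [pvRowsMin, pvRowsMinGo_eq _ _ _ _ _ _ (le_refl _)]
  rw [show (PySem.List.pyRange dot_y (dot_y + dot_size) 1).foldl (fun acc y =>
      (PySem.List.pyRange dot_x (dot_x + dot_size) 1).foldl (fun acc x =>
        (PySem.List.pyRange 0 3 1).foldl (fun acc c =>
          let curr := PySem.List.pyGetD (PySem.List.pyGetD (PySem.List.pyGetD img y []) x []) c 0
          if curr < PySem.List.pyGetD acc c 0 then PySem.List.pySetD acc c curr else acc) acc) acc)
      [255, 255, 255]
    = ((PySem.List.pyRange dot_y (dot_y + dot_size) 1).flatMap (fun y =>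
        (PySem.List.pyRange dot_x (dot_x + dot_size) 1).map (fun x =>
          PySem.List.pyGetD (PySem.List.pyGetD img y []) x []))).foldl pvStepA [255, 255, 255]
    from ?_, pvFoldA]
  rw [pvFoldl_flatMap]
  congr 1
  funext acc y
  rw [List.foldl_map]
  rfl
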